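-- pv_equiv track=rewrite | github.com/kvysseld/helpscout-drafter | draft_responses.py | extract_last_customer_message
-- ===== SOURCE A (Python) =====
-- def extract_last_customer_message(thread_history: str) -> str:
--     """Pull the most recent customer message from formatted thread history."""
--     blocks = thread_history.split("\n\n---\n\n")
--     for block in reversed(blocks):
--         if block.strip().startswith("[CUSTOMER"):
--             lines = block.strip().split("\n", 1)
--             if len(lines) > 1:
--                 return lines[1].strip()
--     return ""
-- ===== SOURCE B (Python) =====
-- def _customer_message(block):
--     """The message text carried by a customer block, or None if it is not one."""
--     b = block.strip()
--     if b.startswith("[CUSTOMER"):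
--         header_and_body = b.split("\n", 1)
--         if len(header_and_body) > 1:
--             return header_and_body[1].strip()
--     return None
--
--
-- def extract_last_customer_message(thread_history: str) -> str:
--     """Pull the most recent customer message from formatted thread history."""
--     blocks = thread_history.split("\n\n---\n\n")
--     messages = [m for m in map(_customer_message, blocks) if m is not None]
--     return messages[-1] if messages else ""
-- ===== Notes on version B (the rewrite author's own statement) =====
-- stated objective: alternative
-- what changed: Staged passes instead of a reverse scan with early return: an Optional-returning extractor is mapped over all blocks, the non-None results are collected into a list of every customer message, and the answer is that list's last element (or "" if empty); A never builds this list and stops at the first qualifying block from the end.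
import Mathlib
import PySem

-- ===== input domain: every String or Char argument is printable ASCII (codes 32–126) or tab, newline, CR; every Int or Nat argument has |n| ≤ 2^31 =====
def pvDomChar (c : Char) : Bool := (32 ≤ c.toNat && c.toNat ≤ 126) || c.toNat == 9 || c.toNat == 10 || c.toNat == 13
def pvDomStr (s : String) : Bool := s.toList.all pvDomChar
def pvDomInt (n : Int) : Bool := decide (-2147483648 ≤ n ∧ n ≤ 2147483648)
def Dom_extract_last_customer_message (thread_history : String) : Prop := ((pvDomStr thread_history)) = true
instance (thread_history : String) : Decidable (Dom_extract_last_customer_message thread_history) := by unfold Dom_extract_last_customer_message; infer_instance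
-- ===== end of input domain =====

-- B replaces A's reverse scan with early return by staged passes: an Option-returning
-- extractor collects EVERY customer message into a list, then the last element is selected;
-- same cost, alternative decomposition.

-- ===== PORT A =====
-- A: walk the reversed block list, return at the first qualifying block, "" if none.
def pvA_pick : List String → String
  | [] => ""
  | block :: rest =>
    let s := PySem.Str.strip block
    if PySem.Str.startswith s "[CUSTOMER" then
      let lines := (PySem.Str.splitMax? s "\n" 1).getD []
      if lines.length > 1 then PySem.Str.strip (lines.getD 1 "")
      else pvA_pick rest
    else pvA_pick rest

def extract_last_customer_message (thread_history : String) : String :=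
  pvA_pick ((PySem.Str.split? thread_history "\n\n---\n\n").getD []).reverse

-- ===== PORT B =====
-- B helper _customer_message: the message text of a customer block, or none.
def pvCustomerMessage (block : String) : Option String :=
  let b := PySem.Str.strip block
  if PySem.Str.startswith b "[CUSTOMER" then
    let header_and_body := (PySem.Str.splitMax? b "\n" 1).getD []
    if header_and_body.length > 1 then some (PySem.Str.strip (header_and_body.getD 1 ""))
    else none
  else none

-- B: map the extractor over all blocks, keep the non-none results, take the last one.
def extract_last_customer_message_alt (thread_history : String) : String :=
  let blocks := (PySem.Str.split? thread_history "\n\n---\n\n").getD []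
  let messages := blocks.filterMap pvCustomerMessage
  messages.getLast?.getD ""

-- ===== PRECONDITION & SPEC =====
def Spec_extract_last_customer_message (thread_history : String) (out : String) : Prop := out = extract_last_customer_message_alt thread_history
instance (thread_history : String) (out : String) : Decidable (Spec_extract_last_customer_message thread_history out) := by unfold Spec_extract_last_customer_message; infer_instance

-- ===== CLAIM (what is proved, stated in full; the proofs are below) =====
def Claim_equal_extract_last_customer_message : Prop := ∀ (thread_history : String), Dom_extract_last_customer_message thread_history → Spec_extract_last_customer_message thread_history (extract_last_customer_message thread_history)

-- ===== LEMMAS AND PROOFS =====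

-- A's reverse scan is findSome? of the per-block extractor over the reversed list.
theorem pvA_pick_eq (l : List String) : pvA_pick l = (l.findSome? pvCustomerMessage).getD "" := by
  induction l with
  | nil => rfl
  | cons b rest ih =>
    simp only [pvA_pick, pvCustomerMessage, List.findSome?_cons]
    split_ifs with h1 h2 <;> simp [ih]

-- first hit of f on a list = head of its filterMap.
theorem findSome?_eq_head?_filterMap {α β : Type} (f : α → Option β) (l : List α) :
    l.findSome? f = (l.filterMap f).head? := by
  induction l with
  | nil => rfl
  | cons a rest ih =>
    simp only [List.findSome?_cons, List.filterMap_cons]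
    cases f a with
    | none => simpa using ih
    | some b => simp

-- ===== VERDICT (by name: the statement is the Claim_ definition above) =====
theorem extract_last_customer_message_spec : Claim_equal_extract_last_customer_message := by
  intro th _
  unfold Spec_extract_last_customer_message extract_last_customer_message extract_last_customer_message_alt
  rw [pvA_pick_eq, findSome?_eq_head?_filterMap, List.filterMap_reverse,
    List.head?_reverse]
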